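-- pv_equiv track=rewrite | github.com/rzonedevops/ad-res-j7 | 06-tools/scripts/validate_dates.py | _group_violations_by_file
-- ===== SOURCE A (Python) =====
-- from typing import List, Dict, Tuple
--
-- def _group_violations_by_file(violations: List[Dict]) -> Dict:
--     """Group violations by file for reporting"""
--     by_file = {}
--     for violation in violations:
--         file_path = violation['file']
--         if file_path not in by_file:
--             by_file[file_path] = []
--         by_file[file_path].append(violation)
--     return by_file
-- ===== SOURCE B (Python) =====
-- from typing import List, Dict, Tuple
--
-- def _group_violations_by_file(violations: List[Dict]) -> Dict:
--     """Group violations by file for reporting (two-pass: distinct keys, then filter)"""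
--     keys = dict.fromkeys(v['file'] for v in violations)
--     return {k: [v for v in violations if v['file'] == k] for k in keys}
-- ===== Notes on version B (the rewrite author's own statement) =====
-- stated objective: alternative
-- what changed: Replaced the incremental dict-insert/append loop with a two-pass scheme: first collect the distinct file keys in first-occurrence order (dict.fromkeys), then build the result with one filtering comprehension per key.
import Mathlib
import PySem

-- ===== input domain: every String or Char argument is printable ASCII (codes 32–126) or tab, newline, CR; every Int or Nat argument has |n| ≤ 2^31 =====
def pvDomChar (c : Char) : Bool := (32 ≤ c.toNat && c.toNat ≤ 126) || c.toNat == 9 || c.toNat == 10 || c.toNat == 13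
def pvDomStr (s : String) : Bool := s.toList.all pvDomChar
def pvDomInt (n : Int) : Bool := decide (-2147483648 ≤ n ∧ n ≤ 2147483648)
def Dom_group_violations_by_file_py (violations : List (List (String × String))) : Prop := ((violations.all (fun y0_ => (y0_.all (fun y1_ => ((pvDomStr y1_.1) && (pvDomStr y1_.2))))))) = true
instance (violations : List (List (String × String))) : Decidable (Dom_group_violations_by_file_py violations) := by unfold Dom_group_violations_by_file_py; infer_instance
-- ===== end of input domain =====

-- B groups by file via two passes (distinct keys in first-occurrence order, then one filter per key)
-- instead of A's incremental dict-insert/append loop; same result, different decomposition.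


-- ===== PORT A =====
-- violation['file']: first match in the association list; a missing key (Python KeyError) is
-- excluded by Pre_, so the "" default is never observed inside the claim
def pvFileKey (v : List (String × String)) : String := (v.lookup "file").getD ""

def group_violations_by_file_py (violations : List (List (String × String))) : List (String × List (List (String × String))) :=
  (violations.foldl
    (fun by_file violation =>
      let file_path := pvFileKey violation
      let by_file := if by_file.contains file_path then by_file else by_file.insert file_path []
      by_file.modify file_path [] (fun l => l ++ [violation]))
    (PySem.Dict.empty : PySem.Dict String (List (List (String × String))))).items

-- ===== PORT B =====
def group_violations_by_file_py_alt (violations : List (List (String × String))) : List (String × List (List (String × String))) :=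
  let keys := PySem.List.dedup (violations.map pvFileKey)
  keys.map (fun k => (k, violations.filter (fun v => pvFileKey v == k)))

-- ===== PRECONDITION & SPEC =====
-- Pre_: every violation dict has a 'file' key; on any other input Python A raises KeyError
def Pre_group_violations_by_file_py (violations : List (List (String × String))) : Prop :=
  (violations.all (fun v => v.any (fun p => p.1 == "file"))) = true
instance (violations : List (List (String × String))) : Decidable (Pre_group_violations_by_file_py violations) := by unfold Pre_group_violations_by_file_py; infer_instance

def pvWitness_group_violations_by_file_py : (List (List (String × String))) :=
  [[("file", "a.py"), ("rule", "r1")], [("file", "b.py")], [("file", "a.py"), ("rule", "r2")]]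

def Spec_group_violations_by_file_py (violations : List (List (String × String))) (out : List (String × List (List (String × String)))) : Prop := out = group_violations_by_file_py_alt violations
instance (violations : List (List (String × String))) (out : List (String × List (List (String × String)))) : Decidable (Spec_group_violations_by_file_py violations out) := by unfold Spec_group_violations_by_file_py; infer_instance

-- ===== CLAIM (what is proved, stated in full; the proofs are below) =====
def Claim_equal_group_violations_by_file_py : Prop := ∀ (violations : List (List (String × String))), Dom_group_violations_by_file_py violations → Pre_group_violations_by_file_py violations → Spec_group_violations_by_file_py violations (group_violations_by_file_py violations)

-- ===== LEMMAS AND PROOFS =====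

-- A's "ensure key present, then append" step is a single modify-with-default step
lemma step_eq_modify (d : PySem.Dict String (List (List (String × String)))) (v : List (String × String)) :
    (let fp := pvFileKey v
     let d' := if d.contains fp then d else d.insert fp []
     d'.modify fp [] (fun l => l ++ [v]))
    = d.modify (pvFileKey v) [] (fun l => l ++ [v]) := by
  set fp := pvFileKey v
  by_cases h : d.contains fp
  · simp [h]
  · simp only [h, Bool.false_eq_true, if_false]
    show (d.insert fp []).insert fp _ = d.insert fp _
    rw [PySem.Dict.insert_insert_self]
    rw [PySem.Dict.getD_insert_self, PySem.Dict.getD_of_not_contains (h := by simpa using h)]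

lemma map_filter_key (l : List (List (String × String))) (c : String) :
    ((l.map (fun v => (pvFileKey v, v))).filter (fun p => p.1 == c)).map (fun p => p.2)
    = l.filter (fun v => pvFileKey v == c) := by
  induction l with
  | nil => rfl
  | cons x xs ih => by_cases hx : pvFileKey x == c <;> simp [hx, ih]

-- each bucket of the modify-loop is the filter of the whole list by that key
lemma getD_fold (l : List (List (String × String))) (c : String) :
    (l.foldl (fun d v => d.modify (pvFileKey v) [] (fun acc => acc ++ [v]))
      (PySem.Dict.empty : PySem.Dict String (List (List (String × String))))).getD c []
    = l.filter (fun v => pvFileKey v == c) := by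
  have h := PySem.Dict.getD_foldl_modify_append (l.map (fun v => (pvFileKey v, v)))
      (PySem.Dict.empty : PySem.Dict String (List (List (String × String)))) c
  rw [List.foldl_map] at h
  rw [h, ← map_filter_key l c]
  simp

-- the dict built by A's loop, as an items list, is exactly B's keys-then-filter result
lemma items_fold_eq_alt (l : List (List (String × String))) :
    (l.foldl (fun d v => d.modify (pvFileKey v) [] (fun acc => acc ++ [v]))
      (PySem.Dict.empty : PySem.Dict String (List (List (String × String))))).items
    = (PySem.List.dedup (l.map pvFileKey)).map (fun k => (k, l.filter (fun v => pvFileKey v == k))) := by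
  set d := l.foldl (fun d v => d.modify (pvFileKey v) [] (fun acc => acc ++ [v]))
      (PySem.Dict.empty : PySem.Dict String (List (List (String × String)))) with hd
  have hnd : d.keys.Nodup := PySem.Dict.nodup_keys_foldl_modify_key l pvFileKey [] _ _ (by simp)
  have hkeys : d.keys = PySem.Set.ofList (l.map pvFileKey) := by
    rw [hd, PySem.Dict.keys_foldl_modify_key]
    simp [PySem.Set.update, PySem.Set.ofList_eq_foldl]
  rw [PySem.Dict.items_eq_map_keys d hnd [], hkeys, PySem.List.dedup_eq_ofList]
  exact List.map_congr_left (fun k _ => by rw [hd, getD_fold])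

-- ===== VERDICT (by name: the statement is the Claim_ definition above) =====
theorem group_violations_by_file_py_spec : Claim_equal_group_violations_by_file_py := by
  intro violations _ _
  show group_violations_by_file_py violations = group_violations_by_file_py_alt violations
  unfold group_violations_by_file_py group_violations_by_file_py_alt
  rw [show (fun (by_file : PySem.Dict String (List (List (String × String)))) violation =>
        let file_path := pvFileKey violation
        let by_file := if by_file.contains file_path then by_file else by_file.insert file_path []
        by_file.modify file_path [] (fun l => l ++ [violation]))
      = fun d v => d.modify (pvFileKey v) [] (fun l => l ++ [v])
      from funext fun d => funext fun v => step_eq_modify d v]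
  exact items_fold_eq_alt violations
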